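-- pv_equiv track=rewrite | github.com/nadineelnaggar/NeSy_2021 | Dyck 1 Counter/Dyck1_Generator.py | generateDataset
-- ===== SOURCE A (Python) =====
-- class Dyck1_Generator(object):
--     def generateParenthesis(self, n):
--         def generate(A = []):
--             if len(A) == 2*n:
--                 if valid(A):
--                     val.append("".join(A))
--                 else:
--                     inval.append("".join(A))
--             else:
--                 A.append('(')
--                 generate(A)
--                 A.pop()
--                 A.append(')')
--                 generate(A)
--                 A.pop()
--
--         def valid(A):
--             bal = 0
--             for c in A:
--                 if c == '(': bal += 1
--                 else: bal -= 1
--                 if bal < 0: return False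
--             return bal == 0
--
--         val = []
--         inval = []
--         generate()
--         return val, inval
--
-- def generateDataset(n_bracket_pairs):
--     gen = Dyck1_Generator()
--     # d1_valid, d1_invalid = gen.generateParenthesis(3)
--     d1_valid = []
--     d1_invalid = []
--     for i in range(1,n_bracket_pairs+1):
--         x,y = gen.generateParenthesis(i)
--         for elem in x:
--             d1_valid.append(elem)
--         for elem in y:
--             d1_invalid.append(elem)
--     return d1_valid,d1_invalid
-- ===== SOURCE B (Python) =====
-- from itertools import product
--
-- def _is_dyck(s):
--     bal = 0
--     mn = 0
--     for c in s:
--         bal += 1 if c == '(' else -1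
--         if bal < mn:
--             mn = bal
--     return bal == 0 and mn == 0
--
-- def generateDataset(n_bracket_pairs):
--     d1_valid = []
--     d1_invalid = []
--     for i in range(1, n_bracket_pairs + 1):
--         for tup in product('()', repeat=2 * i):
--             s = ''.join(tup)
--             if _is_dyck(s):
--                 d1_valid.append(s)
--             else:
--                 d1_invalid.append(s)
--     return d1_valid, d1_invalid
-- ===== Notes on version B (the rewrite author's own statement) =====
-- stated objective: idiomatic
-- what changed: Replaces the recursive backtracking DFS (append/generate/pop with mutable shared list) by a flat iteration over itertools.product('()', repeat=2*i), classifying each string with a single min-tracking balance scan instead of an early-return loop.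
import Mathlib
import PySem

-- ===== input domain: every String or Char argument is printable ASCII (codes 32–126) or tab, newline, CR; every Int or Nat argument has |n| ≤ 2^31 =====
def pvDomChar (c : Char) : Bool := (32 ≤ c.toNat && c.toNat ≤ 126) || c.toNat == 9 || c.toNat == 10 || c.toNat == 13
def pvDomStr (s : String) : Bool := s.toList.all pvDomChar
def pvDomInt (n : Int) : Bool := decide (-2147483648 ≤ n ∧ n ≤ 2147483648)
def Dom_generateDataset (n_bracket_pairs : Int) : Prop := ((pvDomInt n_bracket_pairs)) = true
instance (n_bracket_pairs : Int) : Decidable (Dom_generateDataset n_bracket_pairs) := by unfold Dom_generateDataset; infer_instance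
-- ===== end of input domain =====

-- B replaces A's recursive backtracking DFS by a flat iteration over all 2i-character
-- bracket tuples (itertools.product order) with a min-tracking balance scan (idiomatic).

-- ===== PORT A =====
-- helper 'valid': early-return balance loop
def pvValidA : List Char → Int → Bool
  | [], bal => bal == 0
  | c :: rest, bal =>
    let b := if c = '(' then bal + 1 else bal - 1
    if b < 0 then false else pvValidA rest b

-- helper 'generate': DFS with remaining slots as fuel (A appends '(' / ')' and pops;
-- here the extended list is passed down, the same strings in the same order)
def pvGenA : Nat → List Char → List String × List String
  | 0, A => if pvValidA A 0 then ([String.ofList A], []) else ([], [String.ofList A])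
  | r + 1, A =>
    let l := pvGenA r (A ++ ['('])
    let rr := pvGenA r (A ++ [')'])
    (l.1 ++ rr.1, l.2 ++ rr.2)

def generateDataset (n_bracket_pairs : Int) : List String × List String :=
  (PySem.List.pyRange 1 (n_bracket_pairs + 1) 1).foldl
    (fun acc i =>
      let xy := pvGenA (2 * i).toNat []
      (acc.1 ++ xy.1, acc.2 ++ xy.2))
    ([], [])

-- ===== PORT B =====
-- itertools.product('()', repeat=m): first character varies slowest
def pvTuples : Nat → List (List Char)
  | 0 => [[]]
  | m + 1 => ['(', ')'].flatMap (fun c => (pvTuples m).map (fun t => c :: t))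

def pvStepB (bm : Int × Int) (c : Char) : Int × Int :=
  let b := if c = '(' then bm.1 + 1 else bm.1 - 1
  (b, if b < bm.2 then b else bm.2)

-- _is_dyck: one full balance scan tracking the running minimum
def pvIsDyck (t : List Char) : Bool :=
  let p := t.foldl pvStepB (0, 0)
  p.1 == 0 && p.2 == 0

def generateDataset_alt (n_bracket_pairs : Int) : List String × List String :=
  (PySem.List.pyRange 1 (n_bracket_pairs + 1) 1).foldl
    (fun acc i =>
      (pvTuples (2 * i).toNat).foldl
        (fun acc t =>
          let s := String.ofList t
          if pvIsDyck t then (acc.1 ++ [s], acc.2) else (acc.1, acc.2 ++ [s]))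
        acc)
    ([], [])

-- ===== PRECONDITION & SPEC =====
def Spec_generateDataset (n_bracket_pairs : Int) (out : List String × List String) : Prop := out = generateDataset_alt n_bracket_pairs
instance (n_bracket_pairs : Int) (out : List String × List String) : Decidable (Spec_generateDataset n_bracket_pairs out) := by unfold Spec_generateDataset; infer_instance

-- ===== CLAIM (what is proved, stated in full; the proofs are below) =====
def Claim_equal_generateDataset : Prop := ∀ (n_bracket_pairs : Int), Dom_generateDataset n_bracket_pairs → Spec_generateDataset n_bracket_pairs (generateDataset n_bracket_pairs)

-- ===== LEMMAS AND PROOFS =====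

-- the min component of B's scan never increases
theorem pvStepB_snd_le (l : List Char) (b m : Int) : (List.foldl pvStepB (b, m) l).2 ≤ m := by
  induction l generalizing b m with
  | nil => simp
  | cons c rest ih =>
    simp only [List.foldl_cons]
    have h2 : (pvStepB (b, m) c).2 ≤ m := by
      dsimp only [pvStepB]; split_ifs <;> omega
    have h1 := ih (pvStepB (b, m) c).1 (pvStepB (b, m) c).2
    rw [Prod.mk.eta] at h1
    exact le_trans h1 h2

-- A's early-return validity loop agrees with B's min-tracking scan
theorem pvValidA_eq (l : List Char) (b : Int) (hb : 0 ≤ b) :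
    pvValidA l b = ((List.foldl pvStepB (b, 0) l).1 == 0 && (List.foldl pvStepB (b, 0) l).2 == 0) := by
  induction l generalizing b with
  | nil => simp [pvValidA]
  | cons c rest ih =>
    simp only [pvValidA, List.foldl_cons]
    by_cases h : (if c = '(' then b + 1 else b - 1) < 0
    · rw [if_pos h]
      have hstep : pvStepB (b, 0) c
          = ((if c = '(' then b + 1 else b - 1), (if c = '(' then b + 1 else b - 1)) := by
        dsimp only [pvStepB]; rw [if_pos h]
      rw [hstep]
      have hle := pvStepB_snd_le rest (if c = '(' then b + 1 else b - 1)
        (if c = '(' then b + 1 else b - 1)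
      have hne : ¬ ((List.foldl pvStepB
          ((if c = '(' then b + 1 else b - 1), (if c = '(' then b + 1 else b - 1)) rest).2 = 0) := by
        omega
      simp [hne]
    · rw [if_neg h]
      have hstep : pvStepB (b, 0) c = ((if c = '(' then b + 1 else b - 1), 0) := by
        dsimp only [pvStepB]; rw [if_neg h]
      rw [hstep]
      exact ih _ (by omega)

theorem pvIsDyck_eq (t : List Char) : pvIsDyck t = pvValidA t 0 := by
  rw [pvValidA_eq t 0 le_rfl]; rfl

-- B's inner classification loop, in closed form
theorem pvFoldB (L : List (List Char)) (acc : List String × List String) :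
    L.foldl (fun acc t =>
        let s := String.ofList t
        if pvIsDyck t then (acc.1 ++ [s], acc.2) else (acc.1, acc.2 ++ [s])) acc
      = (acc.1 ++ (L.filter pvIsDyck).map String.ofList,
         acc.2 ++ (L.filter (fun t => !pvIsDyck t)).map String.ofList) := by
  induction L generalizing acc with
  | nil => simp
  | cons t rest ih =>
    simp only [List.foldl_cons, List.filter_cons]
    by_cases h : pvIsDyck t
    · simp [h, ih, List.append_assoc]
    · simp [h, ih, List.append_assoc]

-- A's DFS from prefix A, in closed form: partition of its leaves in DFS order
theorem pvGenA_spec (r : Nat) (A : List Char) :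
    pvGenA r A =
      ((((pvTuples r).map (A ++ ·)).filter (fun t => pvValidA t 0)).map String.ofList,
       (((pvTuples r).map (A ++ ·)).filter (fun t => !pvValidA t 0)).map String.ofList) := by
  induction r generalizing A with
  | zero =>
    simp only [pvGenA, pvTuples, List.map_cons, List.map_nil, List.filter]
    by_cases h : pvValidA (A ++ []) 0
    · simp_all [List.append_nil]
    · simp_all [List.append_nil]
  | succ r ih =>
    simp only [pvGenA, pvTuples, List.flatMap_cons, List.flatMap_nil, List.append_nil,
      List.map_append, List.map_map, List.filter_append]
    rw [ih (A ++ ['(']), ih (A ++ [')'])]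
    have h1 : (fun t => A ++ '(' :: t) = (fun t => (A ++ ['(']) ++ t) := by
      funext t; simp
    have h2 : (fun t => A ++ ')' :: t) = (fun t => (A ++ [')']) ++ t) := by
      funext t; simp
    simp only [Function.comp_def, h1, h2]

-- per-iteration agreement of the two outer loop bodies
theorem pvStep_agree (i : Int) (acc : List String × List String) :
    (let xy := pvGenA (2 * i).toNat []
     (acc.1 ++ xy.1, acc.2 ++ xy.2))
      = (pvTuples (2 * i).toNat).foldl
          (fun acc t =>
            let s := String.ofList t
            if pvIsDyck t then (acc.1 ++ [s], acc.2) else (acc.1, acc.2 ++ [s]))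
          acc := by
  rw [pvFoldB, pvGenA_spec]
  have hid : (pvTuples (2 * i).toNat).map (([] : List Char) ++ ·) = pvTuples (2 * i).toNat := by
    simp
  have hp : (pvTuples (2 * i).toNat).filter pvIsDyck
      = (pvTuples (2 * i).toNat).filter (fun t => pvValidA t 0) := by
    apply List.filter_congr; intro t _; rw [pvIsDyck_eq]
  have hn : (pvTuples (2 * i).toNat).filter (fun t => !pvIsDyck t)
      = (pvTuples (2 * i).toNat).filter (fun t => !pvValidA t 0) := by
    apply List.filter_congr; intro t _; rw [pvIsDyck_eq]
  simp only [hid, hp, hn]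

-- ===== VERDICT (by name: the statement is the Claim_ definition above) =====
theorem generateDataset_spec : Claim_equal_generateDataset := by
  intro n _
  unfold Spec_generateDataset generateDataset generateDataset_alt
  apply List.foldl_ext
  intro acc i _
  exact pvStep_agree i acc
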